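-- pv_equiv track=rewrite | github.com/LinkedEarth/paleopal | backend/services/extractors/sparql_extractor.py | _get_markdown_context
-- ===== SOURCE A (Python) =====
-- def _get_markdown_context(content: str, start_pos: int, end_pos: int) -> str:
--     """Get surrounding context for a match in markdown."""
--     lines = content[:start_pos].split('\n')
--
--     # Look for preceding headings
--     context_parts = []
--
--     for line in reversed(lines[-10:]):  # Look at last 10 lines
--         line = line.strip()
--         if line.startswith('#'):
--             context_parts.append(line)
--             break
--         elif line and not line.startswith('```'):
--             context_parts.append(line)
--
--     context_parts.reverse()
--     return ' | '.join(context_parts) if context_parts else ""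
-- ===== SOURCE B (Python) =====
-- def _get_markdown_context(content: str, start_pos: int, end_pos: int) -> str:
--     """Get surrounding context for a match in markdown."""
--     lines = [ln.strip() for ln in content[:start_pos].split('\n')[-10:]]
--     last = -1
--     for i, ln in enumerate(lines):
--         if ln.startswith('#'):
--             last = i
--     if last >= 0:
--         parts = [lines[last]] + [ln for ln in lines[last + 1:] if ln and not ln.startswith('```')]
--     else:
--         parts = [ln for ln in lines if ln and not ln.startswith('```')]
--     return ' | '.join(parts)
-- ===== Notes on version B (the rewrite author's own statement) =====
-- stated objective: simpler
-- what changed: Replaces A's reverse scan with a break by a forward pass: compute the index of the last heading line in the 10-line window, then take that heading followed by a single forward filter of the later non-empty, non-code-fence lines.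
import Mathlib
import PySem

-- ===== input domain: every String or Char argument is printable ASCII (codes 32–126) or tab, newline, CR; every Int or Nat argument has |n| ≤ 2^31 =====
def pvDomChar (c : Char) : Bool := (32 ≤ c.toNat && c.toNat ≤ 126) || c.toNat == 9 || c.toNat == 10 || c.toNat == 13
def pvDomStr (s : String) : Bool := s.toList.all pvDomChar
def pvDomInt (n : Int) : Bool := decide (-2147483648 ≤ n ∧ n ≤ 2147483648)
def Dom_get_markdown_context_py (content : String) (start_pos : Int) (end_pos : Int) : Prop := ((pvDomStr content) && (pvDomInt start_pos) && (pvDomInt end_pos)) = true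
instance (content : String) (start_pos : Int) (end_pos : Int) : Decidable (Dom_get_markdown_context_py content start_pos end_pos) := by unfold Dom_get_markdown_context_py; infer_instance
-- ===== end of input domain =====

-- B replaces A's reverse scan with a break by a forward pass: find the index of the last
-- heading line, then filter the lines after it (objective: simpler decomposition, same cost).

-- ===== PORT A =====
-- A's 'for line in reversed(lines[-10:])' loop with break, accumulating context_parts in visit order
def pvLoopA : List String → List String
  | [] => []
  | l :: rest =>
    let line := PySem.Str.strip l
    if PySem.Str.startswith line "#" then [line]
    else if line ≠ "" && !(PySem.Str.startswith line "```") then line :: pvLoopA rest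
    else pvLoopA rest

def get_markdown_context_py (content : String) (start_pos : Int) (end_pos : Int) : String :=
  let lines := (PySem.Str.split? (PySem.Str.slice content none (some start_pos)) "\n").getD []
  let context_parts := pvLoopA (PySem.List.slice lines (some (-10)) none).reverse
  let context_parts := context_parts.reverse
  if context_parts ≠ [] then PySem.Str.join " | " context_parts else ""

-- ===== PORT B =====
-- index of the last line starting with '#' (Source B's enumerate loop), -1 if none
def pvLastHead (S : List String) : Int :=
  (PySem.List.enumerate S).foldl (fun last p => if PySem.Str.startswith p.2 "#" then p.1 else last) (-1)

-- Source B's list comprehension filter: non-empty lines not starting with '```'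
def pvFilt (S : List String) : List String :=
  S.filter (fun ln => ln ≠ "" && !(PySem.Str.startswith ln "```"))

def get_markdown_context_py_alt (content : String) (start_pos : Int) (end_pos : Int) : String :=
  let lines := (PySem.List.slice ((PySem.Str.split? (PySem.Str.slice content none (some start_pos)) "\n").getD []) (some (-10)) none).map PySem.Str.strip
  let last := pvLastHead lines
  let parts :=
    if last ≥ 0 then
      ((PySem.List.pyGet? lines last).getD "") :: pvFilt (PySem.List.slice lines (some (last + 1)) none)
    else
      pvFilt lines
  PySem.Str.join " | " parts

-- ===== PRECONDITION & SPEC =====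
def Spec_get_markdown_context_py (content : String) (start_pos : Int) (end_pos : Int) (out : String) : Prop := out = get_markdown_context_py_alt content start_pos end_pos
instance (content : String) (start_pos : Int) (end_pos : Int) (out : String) : Decidable (Spec_get_markdown_context_py content start_pos end_pos out) := by unfold Spec_get_markdown_context_py; infer_instance

-- ===== CLAIM (what is proved, stated in full; the proofs are below) =====
def Claim_equal_get_markdown_context_py : Prop := ∀ (content : String) (start_pos : Int) (end_pos : Int), Dom_get_markdown_context_py content start_pos end_pos → Spec_get_markdown_context_py content start_pos end_pos (get_markdown_context_py content start_pos end_pos)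

-- ===== LEMMAS AND PROOFS =====

-- B's body after stripping, as a function of the stripped line window
def pvPartsB (S : List String) : List String :=
  if pvLastHead S ≥ 0 then
    ((PySem.List.pyGet? S (pvLastHead S)).getD "") :: pvFilt (PySem.List.slice S (some (pvLastHead S + 1)) none)
  else pvFilt S

lemma pvLastHead_snoc (S : List String) (s : String) :
    pvLastHead (S ++ [s]) =
      if PySem.Str.startswith s "#" then (S.length : Int) else pvLastHead S := by
  unfold pvLastHead
  rw [PySem.List.enumerate_append, List.foldl_append]
  simp [PySem.List.enumerate_cons, PySem.List.enumerate_nil]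

lemma pvLastHead_bounds (S : List String) :
    pvLastHead S = -1 ∨ (0 ≤ pvLastHead S ∧ pvLastHead S < (S.length : Int)) := by
  induction S using List.reverseRecOn with
  | nil => left; rfl
  | append_singleton S s ih =>
    rw [pvLastHead_snoc]
    by_cases h : PySem.Str.startswith s "#" = true
    · right
      rw [if_pos h]
      constructor
      · positivity
      · simp only [List.length_append, List.length_cons, List.length_nil]
        push_cast; omega
    · rw [if_neg h]
      rcases ih with h1 | ⟨h1, h2⟩
      · left; exact h1
      · right
        refine ⟨h1, ?_⟩
        simp only [List.length_append, List.length_cons, List.length_nil]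
        push_cast; omega

lemma pvFilt_snoc (S : List String) (s : String) :
    pvFilt (S ++ [s]) = pvFilt S ++ (if s ≠ "" && !(PySem.Str.startswith s "```") then [s] else []) := by
  unfold pvFilt
  rw [List.filter_append, List.filter_singleton]
  cases hbs : (decide (s ≠ "") && !PySem.Str.startswith s "```") <;> rfl

lemma pvPartsB_snoc (S : List String) (s : String) :
    pvPartsB (S ++ [s]) =
      if PySem.Str.startswith s "#" then [s]
      else if s ≠ "" && !(PySem.Str.startswith s "```") then pvPartsB S ++ [s]
      else pvPartsB S := by
  by_cases hh : PySem.Str.startswith s "#" = true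
  · unfold pvPartsB
    rw [pvLastHead_snoc, if_pos hh, if_pos hh]
    have hpos : ((S.length : Int)) ≥ 0 := by positivity
    rw [if_pos hpos]
    have hget : PySem.List.pyGet? (S ++ [s]) ((S.length : Int)) = some s := by
      rw [PySem.List.pyGet?_natCast]
      simp
    have hsl : PySem.List.slice (S ++ [s]) (some ((S.length : Int) + 1)) none = [] := by
      have hc : ((S.length : Int) + 1) = ((S.length + 1 : Nat) : Int) := by push_cast; ring
      rw [hc, PySem.List.slice_from_natCast]
      apply List.drop_eq_nil_of_le
      simp
    rw [hget, hsl]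
    rfl
  · have hl := pvLastHead_snoc S s
    rw [if_neg hh] at hl
    rw [if_neg hh]
    rcases pvLastHead_bounds S with h1 | ⟨h1, h2⟩
    · -- no heading anywhere: both sides are the filter
      unfold pvPartsB
      rw [hl, h1]
      simp only [if_neg (show ¬((-1:Int) ≥ 0) by omega)]
      rw [pvFilt_snoc]
      by_cases hk : (s ≠ "" && !(PySem.Str.startswith s "```")) = true
      · rw [if_pos hk, if_pos hk]
      · rw [if_neg hk, if_neg hk, List.append_nil]
    · -- heading at index k < |S|
      obtain ⟨k, hk⟩ : ∃ k : Nat, pvLastHead S = (k : Int) := ⟨(pvLastHead S).toNat, (Int.toNat_of_nonneg h1).symm⟩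
      have hklt : k < S.length := by
        have := h2; rw [hk] at this; exact_mod_cast this
      unfold pvPartsB
      rw [hl, hk]
      have hpos : ((k : Int)) ≥ 0 := by positivity
      rw [if_pos hpos, if_pos hpos]
      have hget : PySem.List.pyGet? (S ++ [s]) ((k : Int)) = PySem.List.pyGet? S ((k : Int)) := by
        rw [PySem.List.pyGet?_natCast, PySem.List.pyGet?_natCast]
        rw [List.getElem?_append_left hklt]
      have hsl : PySem.List.slice (S ++ [s]) (some ((k : Int) + 1)) none =
          PySem.List.slice S (some ((k : Int) + 1)) none ++ [s] := by
        have hc : ((k : Int) + 1) = ((k + 1 : Nat) : Int) := by push_cast; ring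
        rw [hc, PySem.List.slice_from_natCast, PySem.List.slice_from_natCast]
        exact List.drop_append_of_le_length (by omega)
      rw [hget, hsl, pvFilt_snoc]
      by_cases hkp : (s ≠ "" && !(PySem.Str.startswith s "```")) = true
      · rw [if_pos hkp, if_pos hkp, List.cons_append]
      · rw [if_neg hkp, if_neg hkp, List.append_nil]

lemma pvLoopA_reverse_eq (M : List String) :
    (pvLoopA M).reverse = pvPartsB ((M.map PySem.Str.strip).reverse) := by
  induction M with
  | nil => rfl
  | cons x M ih =>
    rw [List.map_cons, List.reverse_cons, pvPartsB_snoc]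
    show (if PySem.Str.startswith (PySem.Str.strip x) "#" then [PySem.Str.strip x]
          else if PySem.Str.strip x ≠ "" && !(PySem.Str.startswith (PySem.Str.strip x) "```")
               then PySem.Str.strip x :: pvLoopA M else pvLoopA M).reverse = _
    by_cases hh : PySem.Str.startswith (PySem.Str.strip x) "#" = true
    · rw [if_pos hh, if_pos hh]
      rfl
    · rw [if_neg hh, if_neg hh]
      by_cases hk : (PySem.Str.strip x ≠ "" && !(PySem.Str.startswith (PySem.Str.strip x) "```")) = true
      · rw [if_pos hk, if_pos hk, List.reverse_cons, ih]
      · rw [if_neg hk, if_neg hk, ih]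

lemma pvMain (L : List String) :
    (pvLoopA L.reverse).reverse = pvPartsB (L.map PySem.Str.strip) := by
  rw [pvLoopA_reverse_eq]
  congr 1
  rw [← List.map_reverse, List.reverse_reverse]

-- ===== VERDICT (by name: the statement is the Claim_ definition above) =====
theorem get_markdown_context_py_spec : Claim_equal_get_markdown_context_py := by
  intro content start_pos end_pos _
  unfold Spec_get_markdown_context_py get_markdown_context_py get_markdown_context_py_alt
  set L := PySem.List.slice ((PySem.Str.split? (PySem.Str.slice content none (some start_pos)) "\n").getD []) (some (-10)) none with hL
  show (if (pvLoopA L.reverse).reverse ≠ [] then PySem.Str.join " | " (pvLoopA L.reverse).reverse else "")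
      = PySem.Str.join " | " (pvPartsB (L.map PySem.Str.strip))
  rw [pvMain]
  by_cases hp : pvPartsB (L.map PySem.Str.strip) = []
  · rw [hp, if_neg (by simp)]
    rfl
  · rw [if_pos hp]
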